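-- pv_equiv track=rewrite | github.com/zeriouslyzen/praxis | scripts/agent_intelligence/build_agent_intelligence.py | extract_markdown_lede
-- ===== SOURCE A (Python) =====
-- def extract_markdown_lede(content: str) -> str:
--     lines = [ln.strip() for ln in content.strip().splitlines() if ln.strip()]
--     for i, line in enumerate(lines):
--         if line.startswith("#"):
--             for j in range(i + 1, len(lines)):
--                 if lines[j] and not lines[j].startswith("#"):
--                     return lines[j][:220]
--     return lines[0][:220] if lines else ""
-- ===== SOURCE B (Python) =====
-- def extract_markdown_lede(content: str) -> str:
--     lines = [ln.strip() for ln in content.strip().splitlines() if ln.strip()]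
--     seen_heading = False
--     for line in lines:
--         if seen_heading and not line.startswith("#"):
--             return line[:220]
--         elif line.startswith("#"):
--             seen_heading = True
--     return lines[0][:220] if lines else ""
-- ===== Notes on version B (the rewrite author's own statement) =====
-- stated objective: simpler
-- what changed: Replaced A's nested loops (for each heading, an inner index scan over the rest of the list) by a single linear pass with a seen_heading flag.
import Mathlib
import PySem

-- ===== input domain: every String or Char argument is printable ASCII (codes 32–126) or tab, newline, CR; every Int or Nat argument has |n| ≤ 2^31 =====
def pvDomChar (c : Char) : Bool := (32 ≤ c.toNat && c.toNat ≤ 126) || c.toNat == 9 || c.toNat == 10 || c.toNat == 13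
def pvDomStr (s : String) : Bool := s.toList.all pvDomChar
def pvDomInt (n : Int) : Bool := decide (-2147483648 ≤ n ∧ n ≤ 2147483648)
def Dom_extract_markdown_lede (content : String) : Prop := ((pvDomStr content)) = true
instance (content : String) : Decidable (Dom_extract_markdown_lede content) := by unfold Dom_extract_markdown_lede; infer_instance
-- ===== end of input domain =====

-- B replaces A's nested loops (per-heading inner index scan) by one linear pass with a
-- seen-heading flag; same return value on every input (both are total).

-- shared preprocessing: [ln.strip() for ln in content.strip().splitlines() if ln.strip()]
def pvLines (content : String) : List String :=
  ((PySem.Str.splitlines (PySem.Str.strip content)).filter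
      (fun ln => PySem.Str.strip ln ≠ "")).map PySem.Str.strip

-- ===== PORT A =====
-- inner loop: for j in range(i+1, len(lines)): if lines[j] and not lines[j].startswith('#'): return lines[j][:220]
def pvAInner (lines : List String) : List Int → Option String
  | [] => none
  | j :: js =>
    let lj := PySem.List.pyGetD lines j ""
    if lj ≠ "" ∧ PySem.Str.startswith lj "#" = false then
      some (PySem.Str.slice lj none (some 220))
    else pvAInner lines js

-- outer loop: for i, line in enumerate(lines): if line.startswith('#'): <inner>
def pvAOuter (lines : List String) : List (Int × String) → Option String
  | [] => none
  | (i, line) :: rest =>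
    if PySem.Str.startswith line "#" = true then
      match pvAInner lines (PySem.List.pyRange (i + 1) (lines.length : Int) 1) with
      | some r => some r
      | none => pvAOuter lines rest
    else pvAOuter lines rest

def extract_markdown_lede (content : String) : String :=
  let lines := pvLines content
  match pvAOuter lines (PySem.List.enumerate lines) with
  | some r => r
  | none =>
    match lines with
    | [] => ""
    | l :: _ => PySem.Str.slice l none (some 220)

-- ===== PORT B =====
-- single pass with a seen_heading flag
def pvBGo : List String → Bool → Option String
  | [], _ => none
  | line :: rest, seen =>
    if seen && !(PySem.Str.startswith line "#") then
      some (PySem.Str.slice line none (some 220))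
    else if PySem.Str.startswith line "#" = true then pvBGo rest true
    else pvBGo rest seen

def extract_markdown_lede_alt (content : String) : String :=
  let lines := pvLines content
  match pvBGo lines false with
  | some r => r
  | none =>
    match lines with
    | [] => ""
    | l :: _ => PySem.Str.slice l none (some 220)

-- ===== PRECONDITION & SPEC =====
def Spec_extract_markdown_lede (content : String) (out : String) : Prop := out = extract_markdown_lede_alt content
instance (content : String) (out : String) : Decidable (Spec_extract_markdown_lede content out) := by unfold Spec_extract_markdown_lede; infer_instance

-- ===== CLAIM (what is proved, stated in full; the proofs are below) =====
def Claim_equal_extract_markdown_lede : Prop := ∀ (content : String), Dom_extract_markdown_lede content → Spec_extract_markdown_lede content (extract_markdown_lede content)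

-- ===== LEMMAS AND PROOFS =====

-- structural re-statement of A's inner scan, over the suffix it inspects
def pvInnerS : List String → Option String
  | [] => none
  | l :: rest =>
    if l ≠ "" ∧ PySem.Str.startswith l "#" = false then
      some (PySem.Str.slice l none (some 220))
    else pvInnerS rest

-- structural re-statement of A's whole loop nest
def pvOuterS : List String → Option String
  | [] => none
  | l :: rest =>
    if PySem.Str.startswith l "#" = true then
      match pvInnerS rest with
      | some r => some r
      | none => pvOuterS rest
    else pvOuterS rest

theorem pvAInner_eq (lines : List String) (k : Nat) :
    pvAInner lines (PySem.List.pyRange (k : Int) (lines.length : Int) 1) =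
      pvInnerS (lines.drop k) := by
  induction hn : lines.length - k generalizing k with
  | zero =>
    have hk : lines.length <= k := by omega
    rw [PySem.List.pyRange_one_eq_nil (by exact_mod_cast hk), List.drop_eq_nil_of_le hk]
    rfl
  | succ n ih =>
    have hk : k < lines.length := by omega
    rw [PySem.List.pyRange_one_cons (by exact_mod_cast hk),
        List.drop_eq_getElem_cons hk]
    simp only [pvAInner, pvInnerS, PySem.List.pyGetD_natCast, ne_eq]
    rw [List.getD_eq_getElem lines "" hk]
    have h1 : ((k : Int) + 1) = ((k + 1 : Nat) : Int) := by push_cast; ring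
    rw [h1, ih (k + 1) (by omega)]

theorem pvAOuter_eq (lines : List String) (k : Nat) :
    pvAOuter lines (PySem.List.enumerate (lines.drop k) (k : Int)) =
      pvOuterS (lines.drop k) := by
  induction hn : lines.length - k generalizing k with
  | zero =>
    have hk : lines.length <= k := by omega
    rw [List.drop_eq_nil_of_le hk]
    rfl
  | succ n ih =>
    have hk : k < lines.length := by omega
    rw [List.drop_eq_getElem_cons hk, PySem.List.enumerate_cons]
    simp only [pvAOuter, pvOuterS]
    have h1 : ((k : Int) + 1) = ((k + 1 : Nat) : Int) := by push_cast; ring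
    rw [h1, pvAInner_eq lines (k + 1), ih (k + 1) (by omega)]

theorem pvBGo_true (ls : List String) (hne : forall l, l ∈ ls → l ≠ "") :
    pvBGo ls true = pvInnerS ls := by
  induction ls with
  | nil => rfl
  | cons l rest ih =>
    have hl : l ≠ "" := hne l (by simp)
    have hrest : forall x, x ∈ rest → x ≠ "" := fun x hx => hne x (by simp [hx])
    cases hsw : PySem.Chars.startswith l.toList ['#'] with
    | true => simp [pvBGo, pvInnerS, hsw, ih hrest]
    | false => simp [pvBGo, pvInnerS, hsw, hl]

theorem pvInnerS_none (ls : List String) (hne : forall l, l ∈ ls → l ≠ "")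
    (h : pvInnerS ls = none) : pvOuterS ls = none := by
  induction ls with
  | nil => rfl
  | cons l rest ih =>
    have hl : l ≠ "" := hne l (by simp)
    have hrest : forall x, x ∈ rest → x ≠ "" := fun x hx => hne x (by simp [hx])
    cases hsw : PySem.Chars.startswith l.toList ['#'] with
    | false => simp [pvInnerS, hsw, hl] at h
    | true =>
      simp [pvInnerS, hsw] at h
      simp [pvOuterS, hsw, h, ih hrest h]

theorem pvBGo_false (ls : List String) (hne : forall l, l ∈ ls → l ≠ "") :
    pvBGo ls false = pvOuterS ls := by
  induction ls with
  | nil => rfl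
  | cons l rest ih =>
    have hrest : forall x, x ∈ rest → x ≠ "" := fun x hx => hne x (by simp [hx])
    cases hsw : PySem.Chars.startswith l.toList ['#'] with
    | false => simp [pvBGo, pvOuterS, hsw, ih hrest]
    | true =>
      have hb := pvBGo_true rest hrest
      cases h : pvInnerS rest with
      | some r => simp [pvBGo, pvOuterS, hsw, hb, h]
      | none => simp [pvBGo, pvOuterS, hsw, hb, h, pvInnerS_none rest hrest h]

theorem pvLines_ne (content : String) : ∀ l ∈ pvLines content, l ≠ "" := by
  intro l hl
  simp only [pvLines, List.mem_map, List.mem_filter] at hl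
  obtain ⟨x, ⟨_, hx⟩, rfl⟩ := hl
  simpa using hx

-- ===== VERDICT (by name: the statement is the Claim_ definition above) =====
theorem extract_markdown_lede_spec : Claim_equal_extract_markdown_lede := by
  intro content _
  unfold Spec_extract_markdown_lede
  have hA := pvAOuter_eq (pvLines content) 0
  simp only [List.drop_zero, Nat.cast_zero] at hA
  have hB := pvBGo_false (pvLines content) (fun l hl => pvLines_ne content l hl)
  simp only [extract_markdown_lede, extract_markdown_lede_alt, hA, hB]
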